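-- pv_equiv track=rewrite | github.com/robinandreeklund-collab/oneseekv1 | surfsense_backend/app/agents/new_chat/debate_executor.py | _resolve_winner
-- ===== SOURCE A (Python) =====
-- def _resolve_winner(
--     vote_counts: dict[str, int],
--     word_counts: dict[str, int],
-- ) -> tuple[str, bool]:
--     """Resolve the winner, using word count as tiebreaker.
--
--     Returns (winner_name, tiebreaker_used).
--     """
--     if not vote_counts:
--         return ("", False)
--
--     max_votes = max(vote_counts.values())
--     tied = [m for m, v in vote_counts.items() if v == max_votes]
--
--     if len(tied) == 1:
--         return (tied[0], False)
--
--     # Tiebreaker: highest total word count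
--     winner = max(tied, key=lambda m: word_counts.get(m, 0))
--     return (winner, True)
-- ===== SOURCE B (Python) =====
-- def _resolve_winner(
--     vote_counts: dict[str, int],
--     word_counts: dict[str, int],
-- ) -> tuple[str, bool]:
--     """Resolve the winner in one pass, using word count as tiebreaker.
--
--     Returns (winner_name, tiebreaker_used).
--     """
--     it = iter(vote_counts.items())
--     first = next(it, None)
--     if first is None:
--         return ("", False)
--     best_name, best_votes = first
--     best_word = word_counts.get(best_name, 0)
--     tie = False
--     for name, v in it:
--         if v > best_votes:
--             best_votes = v
--             best_name = name
--             best_word = word_counts.get(name, 0)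
--             tie = False
--         elif v == best_votes:
--             tie = True
--             w = word_counts.get(name, 0)
--             if w > best_word:
--                 best_name = name
--                 best_word = w
--     return (best_name, tie)
-- ===== Notes on version B (the rewrite author's own statement) =====
-- stated objective: alternative
-- what changed: Replaces A's three passes (max of values, filter of tied names, max-by-word-count over the tied list) by a single pass over vote_counts.items() maintaining best_votes/best_name/best_word and a tie flag.
import Mathlib
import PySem

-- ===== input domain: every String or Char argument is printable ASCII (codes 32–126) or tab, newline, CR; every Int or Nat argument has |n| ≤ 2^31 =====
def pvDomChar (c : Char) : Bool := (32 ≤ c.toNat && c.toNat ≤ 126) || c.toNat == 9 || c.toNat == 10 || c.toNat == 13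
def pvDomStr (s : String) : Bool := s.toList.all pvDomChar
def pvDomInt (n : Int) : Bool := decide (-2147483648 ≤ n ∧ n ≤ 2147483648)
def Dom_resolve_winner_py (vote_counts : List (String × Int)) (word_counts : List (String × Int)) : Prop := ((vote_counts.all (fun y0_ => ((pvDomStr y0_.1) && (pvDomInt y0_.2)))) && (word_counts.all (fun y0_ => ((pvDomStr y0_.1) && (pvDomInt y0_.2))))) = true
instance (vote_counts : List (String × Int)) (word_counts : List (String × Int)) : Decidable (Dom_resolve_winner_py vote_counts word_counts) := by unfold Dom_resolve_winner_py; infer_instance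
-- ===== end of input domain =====

-- B fuses A's three passes (max of values, filter, max-by-word-count) into one pass
-- with running best_votes/best_name/best_word and a tie flag (objective: alternative).

-- ===== PORT A =====
def resolve_winner_py (vote_counts : List (String × Int)) (word_counts : List (String × Int)) : String × Bool :=
  if vote_counts = [] then ("", false)
  else
    match PySem.List.max? (vote_counts.map Prod.snd) (fun v => v) with
    | none => ("", false)  -- unreachable: vote_counts ≠ []
    | some max_votes =>
      let tied := (vote_counts.filter (fun p => p.2 == max_votes)).map Prod.fst
      if tied.length = 1 then (PySem.List.pyGetD tied 0 "", false)
      else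
        match PySem.List.max? tied (fun m => (PySem.Dict.mk word_counts).getD m 0) with
        | none => ("", false)  -- unreachable: tied ≠ []
        | some winner => (winner, true)

-- ===== PORT B =====
def resolve_winner_py_alt (vote_counts : List (String × Int)) (word_counts : List (String × Int)) : String × Bool :=
  match vote_counts with
  | [] => ("", false)
  | p0 :: rest =>
    let wkey := fun (m : String) => (PySem.Dict.mk word_counts).getD m 0
    let st := rest.foldl (fun (st : Int × String × Int × Bool) p =>
        if st.1 < p.2 then (p.2, p.1, wkey p.1, false)
        else if p.2 = st.1 then
          if st.2.2.1 < wkey p.1 then (st.1, p.1, wkey p.1, true)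
          else (st.1, st.2.1, st.2.2.1, true)
        else st) (p0.2, p0.1, wkey p0.1, false)
    (st.2.1, st.2.2.2)

-- ===== PRECONDITION & SPEC =====
def Spec_resolve_winner_py (vote_counts : List (String × Int)) (word_counts : List (String × Int)) (out : String × Bool) : Prop := out = resolve_winner_py_alt vote_counts word_counts
instance (vote_counts : List (String × Int)) (word_counts : List (String × Int)) (out : String × Bool) : Decidable (Spec_resolve_winner_py vote_counts word_counts out) := by unfold Spec_resolve_winner_py; infer_instance

-- ===== CLAIM (what is proved, stated in full; the proofs are below) =====
def Claim_equal_resolve_winner_py : Prop := ∀ (vote_counts : List (String × Int)) (word_counts : List (String × Int)), Dom_resolve_winner_py vote_counts word_counts → Spec_resolve_winner_py vote_counts word_counts (resolve_winner_py vote_counts word_counts)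

-- ===== LEMMAS AND PROOFS =====

-- proof-only helpers: B's word-count key, B's step function, and the abstract state
-- that the fold maintains after processing the prefix p0 :: pre
def wkeyF (wc : List (String × Int)) (m : String) : Int := (PySem.Dict.mk wc).getD m 0

def stepF (wc : List (String × Int)) (st : Int × String × Int × Bool) (p : String × Int) :
    Int × String × Int × Bool :=
  if st.1 < p.2 then (p.2, p.1, wkeyF wc p.1, false)
  else if p.2 = st.1 then
    if st.2.2.1 < wkeyF wc p.1 then (st.1, p.1, wkeyF wc p.1, true)
    else (st.1, st.2.1, st.2.2.1, true)
  else st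

def mvOf (p0 : String × Int) (pre : List (String × Int)) : Int :=
  (pre.map Prod.snd).foldl max p0.2

def tiedOf (p0 : String × Int) (pre : List (String × Int)) : List String :=
  ((p0 :: pre).filter (fun p => p.2 == mvOf p0 pre)).map Prod.fst

def bnOf (wc : List (String × Int)) (p0 : String × Int) (pre : List (String × Int)) : String :=
  (PySem.List.max? (tiedOf p0 pre) (wkeyF wc)).getD ""

def stateOf (wc : List (String × Int)) (p0 : String × Int) (pre : List (String × Int)) :
    Int × String × Int × Bool :=
  (mvOf p0 pre, bnOf wc p0 pre, wkeyF wc (bnOf wc p0 pre), decide ((tiedOf p0 pre).length ≠ 1))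

theorem foldl_max_init (l : List Int) (a : Int) : a ≤ l.foldl max a := by
  induction l generalizing a with
  | nil => simp
  | cons x t ih => exact le_trans (le_max_left a x) (ih (max a x))

theorem foldl_max_mem (l : List Int) (a : Int) : ∀ x ∈ l, x ≤ l.foldl max a := by
  induction l generalizing a with
  | nil => simp
  | cons y t ih =>
    intro x hx
    rcases List.mem_cons.mp hx with hx | hx
    · subst hx
      simpa using le_trans (le_max_right a x) (foldl_max_init t (max a x))
    · exact ih (max a y) x hx

theorem foldl_max_attained (l : List Int) (a : Int) : l.foldl max a = a ∨ l.foldl max a ∈ l := by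
  induction l generalizing a with
  | nil => simp
  | cons y t ih =>
    simp only [List.foldl_cons]
    rcases ih (max a y) with h | h
    · rcases max_choice a y with hm | hm
      · left; rw [h, hm]
      · right; exact List.mem_cons.mpr (Or.inl (h.trans hm))
    · right; exact List.mem_cons_of_mem y h

theorem le_mvOf (p0 : String × Int) (pre : List (String × Int)) :
    ∀ p ∈ p0 :: pre, p.2 ≤ mvOf p0 pre := by
  intro p hp
  rcases List.mem_cons.mp hp with hp | hp
  · subst hp; exact foldl_max_init _ _
  · exact foldl_max_mem _ _ p.2 (List.mem_map_of_mem hp)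

theorem tiedOf_ne_nil (p0 : String × Int) (pre : List (String × Int)) :
    tiedOf p0 pre ≠ [] := by
  rcases foldl_max_attained (pre.map Prod.snd) p0.2 with h | h
  · have : p0.1 ∈ tiedOf p0 pre := by
      simp only [tiedOf, List.mem_map]
      exact ⟨p0, by simp [mvOf, h], rfl⟩
    exact List.ne_nil_of_mem this
  · rcases List.mem_map.mp h with ⟨q, hq, hqv⟩
    have : q.1 ∈ tiedOf p0 pre := by
      simp only [tiedOf, List.mem_map]
      exact ⟨q, by simp [mvOf, hqv, hq], rfl⟩
    exact List.ne_nil_of_mem this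

theorem max?_append_singleton {α κ : Type} [LT κ] [DecidableLT κ]
    (xs : List α) (x : α) (key : α → κ) :
    PySem.List.max? (xs ++ [x]) key =
      match PySem.List.max? xs key with
      | none => some x
      | some m => if key m < key x then some x else some m := by
  unfold PySem.List.max?
  rw [List.foldl_append]
  rfl

theorem mvOf_append (p0 : String × Int) (pre : List (String × Int)) (x : String × Int) :
    mvOf p0 (pre ++ [x]) = max (mvOf p0 pre) x.2 := by
  simp [mvOf, List.foldl_append]

-- one step of B's fold advances the abstract state by one element
theorem stepF_stateOf (wc : List (String × Int)) (p0 : String × Int)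
    (pre : List (String × Int)) (x : String × Int) :
    stepF wc (stateOf wc p0 pre) x = stateOf wc p0 (pre ++ [x]) := by
  rcases lt_trichotomy (mvOf p0 pre) x.2 with hlt | heq | hgt
  · -- strictly larger vote: new sole leader
    have hmv : mvOf p0 (pre ++ [x]) = x.2 := by
      rw [mvOf_append]; exact max_eq_right hlt.le
    have htied : tiedOf p0 (pre ++ [x]) = [x.1] := by
      have hnil : (p0 :: pre).filter (fun p => p.2 == mvOf p0 (pre ++ [x])) = [] := by
        rw [List.filter_eq_nil_iff]
        intro p hp
        have := le_mvOf p0 pre p hp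
        simp only [beq_iff_eq, hmv]
        omega
      simp only [tiedOf]
      rw [show p0 :: (pre ++ [x]) = (p0 :: pre) ++ [x] from rfl, List.filter_append, hnil]
      simp [hmv]
    simp [stepF, stateOf, hlt, hmv, htied, bnOf, PySem.List.max?]
  · -- equal vote: one more tied member
    have hmv : mvOf p0 (pre ++ [x]) = mvOf p0 pre := by
      rw [mvOf_append, heq, max_self]
    have htied : tiedOf p0 (pre ++ [x]) = tiedOf p0 pre ++ [x.1] := by
      simp only [tiedOf, hmv, show p0 :: (pre ++ [x]) = (p0 :: pre) ++ [x] from rfl]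
      rw [List.filter_append, List.map_append]
      simp [heq]
    obtain ⟨bn, hbn⟩ : ∃ bn, PySem.List.max? (tiedOf p0 pre) (wkeyF wc) = some bn := by
      cases h : PySem.List.max? (tiedOf p0 pre) (wkeyF wc) with
      | none => exact absurd ((PySem.List.max?_eq_none_iff _ _).mp h) (tiedOf_ne_nil p0 pre)
      | some m => exact ⟨m, rfl⟩
    have hlen : (tiedOf p0 pre).length ≠ 0 := by
      simpa [List.length_eq_zero_iff] using tiedOf_ne_nil p0 pre
    have hmax' := max?_append_singleton (tiedOf p0 pre) x.1 (wkeyF wc)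
    rw [hbn] at hmax'
    by_cases hw : wkeyF wc bn < wkeyF wc x.1
    · simp [stepF, stateOf, bnOf, heq, hmv, htied, hbn, hmax', hw, hlen]
    · simp [stepF, stateOf, bnOf, heq, hmv, htied, hbn, hmax', hw, hlen]
  · -- strictly smaller vote: state unchanged
    have hmv : mvOf p0 (pre ++ [x]) = mvOf p0 pre := by
      rw [mvOf_append]; exact max_eq_left hgt.le
    have htied : tiedOf p0 (pre ++ [x]) = tiedOf p0 pre := by
      simp only [tiedOf, hmv, show p0 :: (pre ++ [x]) = (p0 :: pre) ++ [x] from rfl]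
      rw [List.filter_append, List.map_append]
      have : x.2 ≠ mvOf p0 pre := by omega
      simp [this]
    simp [stepF, stateOf, bnOf, hmv, htied, show ¬ mvOf p0 pre < x.2 from not_lt.mpr hgt.le,
      show x.2 ≠ mvOf p0 pre from by omega]

theorem foldl_stepF (wc : List (String × Int)) (p0 : String × Int)
    (l pre : List (String × Int)) :
    l.foldl (stepF wc) (stateOf wc p0 pre) = stateOf wc p0 (pre ++ l) := by
  induction l generalizing pre with
  | nil => simp
  | cons x t ih =>
    rw [List.foldl_cons, stepF_stateOf, ih]
    simp

theorem stateOf_nil (wc : List (String × Int)) (p0 : String × Int) :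
    stateOf wc p0 [] = (p0.2, p0.1, wkeyF wc p0.1, false) := by
  have htied : tiedOf p0 [] = [p0.1] := by simp [tiedOf, mvOf]
  simp [stateOf, bnOf, htied, mvOf, PySem.List.max?]

theorem alt_eq_stateOf (wc : List (String × Int)) (p0 : String × Int)
    (rest : List (String × Int)) :
    resolve_winner_py_alt (p0 :: rest) wc =
      ((stateOf wc p0 rest).2.1, (stateOf wc p0 rest).2.2.2) := by
  have : resolve_winner_py_alt (p0 :: rest) wc =
      ((rest.foldl (stepF wc) (p0.2, p0.1, wkeyF wc p0.1, false)).2.1,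
       (rest.foldl (stepF wc) (p0.2, p0.1, wkeyF wc p0.1, false)).2.2.2) := rfl
  rw [this, ← stateOf_nil, foldl_stepF]
  simp

-- ===== VERDICT (by name: the statement is the Claim_ definition above) =====
theorem resolve_winner_py_spec : Claim_equal_resolve_winner_py := by
  intro vc wc _
  unfold Spec_resolve_winner_py
  cases vc with
  | nil => rfl
  | cons p0 rest =>
    rw [alt_eq_stateOf]
    have hmax : PySem.List.max? ((p0 :: rest).map Prod.snd) (fun v => v)
        = some (mvOf p0 rest) := by
      rw [List.map_cons, PySem.List.max?_id_cons]; rfl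
    simp only [resolve_winner_py, hmax, reduceCtorEq, if_false]
    have htied : ((p0 :: rest).filter (fun p => p.2 == mvOf p0 rest)).map Prod.fst
        = tiedOf p0 rest := rfl
    rw [htied]
    by_cases hlen : (tiedOf p0 rest).length = 1
    · obtain ⟨t, ht⟩ := List.length_eq_one_iff.mp hlen
      simp [ht, stateOf, bnOf, PySem.List.max?, PySem.List.pyGetD_zero_cons]
    · obtain ⟨bn, hbn⟩ : ∃ bn, PySem.List.max? (tiedOf p0 rest) (wkeyF wc) = some bn := by
        cases h : PySem.List.max? (tiedOf p0 rest) (wkeyF wc) with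
        | none => exact absurd ((PySem.List.max?_eq_none_iff _ _).mp h) (tiedOf_ne_nil p0 rest)
        | some m => exact ⟨m, rfl⟩
      have hbn' : PySem.List.max? (tiedOf p0 rest)
          (fun m => (PySem.Dict.mk wc).getD m 0) = some bn := hbn
      simp [hlen, hbn', stateOf, bnOf, hbn]
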